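-- pv_equiv track=rewrite | github.com/cicciopanzer27/teros | src/lib/teros/compiler/code_generator.py | _parse_tritarray
-- ===== SOURCE A (Python) =====
-- def _parse_tritarray(value: str) -> int:
--     """Parse tritarray string to integer."""
--     if value.startswith('0t'):
--         # Parse ternary literal
--         trits = value[2:]
--         result = 0
--         for i, trit in enumerate(trits):
--             if trit == '+':
--                 result += 3 ** i
--             elif trit == '-':
--                 result -= 3 ** i
--             # '0' adds nothing
--         return result
--     else:
--         return 0
-- ===== SOURCE B (Python) =====
-- def _parse_tritarray(value: str) -> int:
--     """Parse tritarray string to integer via shifted base-3: map trits +/-/other to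
--     digits 2/0/1 (most-significant first), parse with int(_, 3), subtract the offset
--     (3**n - 1) // 2 that the +1 digit shift introduced."""
--     if value.startswith('0t'):
--         trits = value[2:]
--         if not trits:
--             return 0
--         shifted = ''.join('2' if c == '+' else '0' if c == '-' else '1' for c in reversed(trits))
--         return int(shifted, 3) - (3 ** len(trits) - 1) // 2
--     return 0
-- ===== Notes on version B (the rewrite author's own statement) =====
-- stated objective: alternative
-- what changed: Replaces the enumerate loop adding/subtracting explicit powers 3**i by a shifted-base-3 reading: translate trits +/-/other to digits 2/0/1, parse the whole string with int(_, 3), and subtract the closed-form offset (3**n - 1) // 2.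
import Mathlib
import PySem

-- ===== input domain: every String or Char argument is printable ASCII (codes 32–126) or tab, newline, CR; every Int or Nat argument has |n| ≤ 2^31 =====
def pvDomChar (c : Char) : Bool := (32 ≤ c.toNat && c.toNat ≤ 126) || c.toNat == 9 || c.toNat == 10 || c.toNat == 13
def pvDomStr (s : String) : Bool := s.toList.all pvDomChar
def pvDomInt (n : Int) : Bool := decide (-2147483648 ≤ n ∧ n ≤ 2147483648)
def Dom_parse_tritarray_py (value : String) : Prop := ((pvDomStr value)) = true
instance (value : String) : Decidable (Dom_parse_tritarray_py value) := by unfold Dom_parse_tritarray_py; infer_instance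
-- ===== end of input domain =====

-- B replaces A's enumerate-and-powers loop (± 3**i) by a shifted base-3 reading:
-- trits map to digits 2/0/1, one int(_, 3) parse, minus the closed-form offset (3**n - 1) // 2.

-- ===== PORT A =====
def parse_tritarray_py (value : String) : Int :=
  if PySem.Str.startswith value "0t" then
    let trits := (PySem.Str.slice value (some 2) none).toList
    (PySem.List.enumerate trits 0).foldl
      (fun result p =>
        if p.2 == '+' then result + 3 ^ p.1.toNat
        else if p.2 == '-' then result - 3 ^ p.1.toNat
        else result) 0
  else 0

-- ===== PORT B =====
-- the digit translation '+' → '2', '-' → '0', other → '1'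
def pvShift (c : Char) : Char := if c == '+' then '2' else if c == '-' then '0' else '1'

-- hand port of int(s, 3); exact here because Source B only feeds it strings of the digit chars '0'..'2'
def pvBase3 (s : List Char) : Int := s.foldl (fun a c => a * 3 + ((c.toNat : Int) - 48)) 0

def parse_tritarray_py_alt (value : String) : Int :=
  if PySem.Str.startswith value "0t" then
    let trits := (PySem.Str.slice value (some 2) none).toList
    if trits.isEmpty then 0
    else pvBase3 (trits.reverse.map pvShift) - PySem.Int.floordiv (3 ^ trits.length - 1) 2
  else 0

-- ===== PRECONDITION & SPEC =====
def Spec_parse_tritarray_py (value : String) (out : Int) : Prop := out = parse_tritarray_py_alt value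
instance (value : String) (out : Int) : Decidable (Spec_parse_tritarray_py value out) := by unfold Spec_parse_tritarray_py; infer_instance

-- ===== CLAIM (what is proved, stated in full; the proofs are below) =====
def Claim_equal_parse_tritarray_py : Prop := ∀ (value : String), Dom_parse_tritarray_py value → Spec_parse_tritarray_py value (parse_tritarray_py value)

-- ===== LEMMAS AND PROOFS =====

-- the signed trit value (least-significant first recursion)
def pvV : List Char → Int
  | [] => 0
  | c :: t => (if c == '+' then 1 else if c == '-' then (-1) else 0) + 3 * pvV t

theorem pvA_fold (l : List Char) : ∀ (s : Nat) (r : Int),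
    (PySem.List.enumerate l (s : Int)).foldl
      (fun result p =>
        if p.2 == '+' then result + 3 ^ p.1.toNat
        else if p.2 == '-' then result - 3 ^ p.1.toNat
        else result) r
    = r + 3 ^ s * pvV l := by
  induction l with
  | nil => intro s r; simp [PySem.List.enumerate_nil, pvV]
  | cons c l ih =>
    intro s r
    rw [PySem.List.enumerate_cons]
    have hcast : (s : Int) + 1 = ((s + 1 : Nat) : Int) := by push_cast; ring
    simp only [List.foldl_cons, hcast, ih (s + 1)]
    have hnat : ((s : Int)).toNat = s := Int.toNat_natCast s
    by_cases h1 : c = '+'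
    · simp [h1, pvV, hnat, pow_succ]; ring
    · by_cases h2 : c = '-'
      · simp [h2, pvV, hnat, pow_succ]; ring
      · simp [h1, h2, pvV, pow_succ]; ring

-- the digit value of a shifted char is the trit value plus one
theorem pvShift_val (c : Char) :
    ((pvShift c).toNat : Int) - 48
      = (if c == '+' then 1 else if c == '-' then (-1) else 0) + 1 := by
  unfold pvShift
  by_cases h1 : c = '+'
  · simp [h1]
  · by_cases h2 : c = '-'
    · simp [h2]
    · simp [h1, h2]

-- parsing the reversed shifted string equals the +1-shifted trit recursion
theorem pvBase3_rev_map (l : List Char) :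
    pvBase3 (l.reverse.map pvShift)
      = pvV l + PySem.Int.floordiv (3 ^ l.length - 1) 2 := by
  have key : ∀ m : List Char,
      2 * pvBase3 (m.reverse.map pvShift) = 2 * pvV m + 3 ^ m.length - 1 := by
    intro m
    induction m with
    | nil => simp [pvBase3, pvV]
    | cons c t ih =>
      have hstep : pvBase3 ((c :: t).reverse.map pvShift)
          = pvBase3 (t.reverse.map pvShift) * 3 + (((pvShift c).toNat : Int) - 48) := by
        simp [pvBase3, List.foldl_append]
      rw [hstep, pvShift_val c]
      simp only [pvV, List.length_cons, pow_succ]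
      omega
  have h2 := key l
  have hfd : PySem.Int.floordiv (3 ^ l.length - 1) 2
      = pvBase3 (l.reverse.map pvShift) - pvV l := by
    have : (3 : Int) ^ l.length - 1 = 2 * (pvBase3 (l.reverse.map pvShift) - pvV l) := by omega
    rw [this, PySem.Int.floordiv_eq_ediv_of_pos (by omega)]
    omega
  omega

-- ===== VERDICT (by name: the statement is the Claim_ definition above) =====
theorem parse_tritarray_py_spec : Claim_equal_parse_tritarray_py := by
  intro value _
  unfold Spec_parse_tritarray_py parse_tritarray_py parse_tritarray_py_alt
  by_cases h : PySem.Str.startswith value "0t"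
  · simp only [if_pos h]
    generalize (PySem.Str.slice value (some 2) none).toList = l
    have hA : (PySem.List.enumerate l 0).foldl
        (fun result p =>
          if p.2 == '+' then result + 3 ^ p.1.toNat
          else if p.2 == '-' then result - 3 ^ p.1.toNat
          else result) 0 = pvV l := by
      simpa using pvA_fold l 0 0
    by_cases he : l.isEmpty
    · rcases List.isEmpty_iff.mp he with rfl
      simp [PySem.List.enumerate_nil]
    · rw [if_neg he, hA, pvBase3_rev_map]
      ring
  · simp only [if_neg h]
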